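-- pv_equiv track=rewrite | github.com/trueforme/hopes_and_dreams | run.py | get_top_amphipod_to_move
-- ===== SOURCE A (Python) =====
-- ROOM_TYPES = ['A', 'B', 'C', 'D']
--
-- def get_top_amphipod_to_move(rooms, room_index):
--     target_type = ROOM_TYPES[room_index]
--     room_column = rooms[room_index]
--     if all(symbol in ('.', target_type) for symbol in room_column):
--         return -1
--     for depth in range(len(room_column)):
--         if room_column[depth] != '.':
--             return depth
--     return -1
-- ===== SOURCE B (Python) =====
-- ROOM_TYPES = ['A', 'B', 'C', 'D']
--
-- def get_top_amphipod_to_move(rooms, room_index):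
--     target_type = ROOM_TYPES[room_index]
--     first_nonempty = -1
--     needs_move = False
--     for depth, symbol in enumerate(rooms[room_index]):
--         if symbol != '.':
--             if first_nonempty == -1:
--                 first_nonempty = depth
--             if symbol != target_type:
--                 needs_move = True
--     return first_nonempty if needs_move else -1
-- ===== Notes on version B (the rewrite author's own statement) =====
-- stated objective: alternative
-- what changed: A makes two scans (an all(...) cleanliness check, then a find-first loop); B makes a single pass maintaining a first-nonempty index and a needs-move flag and combines them at the end.
import Mathlib
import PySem

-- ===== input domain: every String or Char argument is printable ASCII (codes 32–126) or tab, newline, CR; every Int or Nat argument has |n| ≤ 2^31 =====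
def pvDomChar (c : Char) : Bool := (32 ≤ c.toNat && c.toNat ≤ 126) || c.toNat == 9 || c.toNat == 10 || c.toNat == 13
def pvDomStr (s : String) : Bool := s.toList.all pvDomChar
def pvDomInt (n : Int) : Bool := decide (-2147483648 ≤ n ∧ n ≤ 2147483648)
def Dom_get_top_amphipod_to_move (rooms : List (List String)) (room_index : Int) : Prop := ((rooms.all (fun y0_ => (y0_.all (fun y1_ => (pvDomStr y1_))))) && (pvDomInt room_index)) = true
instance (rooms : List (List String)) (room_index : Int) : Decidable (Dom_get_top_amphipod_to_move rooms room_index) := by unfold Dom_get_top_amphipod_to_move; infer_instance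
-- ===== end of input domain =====

-- B folds A's two scans (an all(...) cleanliness check plus a find-first loop) into one pass; objective: alternative decomposition.

-- ===== PORT A =====
def ROOM_TYPES : List String := ["A", "B", "C", "D"]

-- A's `for depth in range(len(room_column)): if room_column[depth] != '.': return depth` loop
def pvFindDepthA : List String → Int → Int
  | [], _ => -1
  | s :: rest, d => if s ≠ "." then d else pvFindDepthA rest (d + 1)

def get_top_amphipod_to_move (rooms : List (List String)) (room_index : Int) : Int :=
  match PySem.List.pyGet? ROOM_TYPES room_index, PySem.List.pyGet? rooms room_index with
  | some target_type, some room_column =>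
    if room_column.all (fun symbol => symbol = "." ∨ symbol = target_type) then -1
    else pvFindDepthA room_column 0
  | _, _ => 0  -- unreachable under Pre_ (IndexError in Python)

-- ===== PORT B =====
-- B's single loop over enumerate(rooms[room_index]) with accumulators (first_nonempty, needs_move)
def pvScanB : List String → String → Int → Int → Bool → Int
  | [], _, _, first_nonempty, needs_move => if needs_move then first_nonempty else -1
  | symbol :: rest, target_type, depth, first_nonempty, needs_move =>
    if symbol ≠ "." then
      pvScanB rest target_type (depth + 1)
        (if first_nonempty = -1 then depth else first_nonempty)
        (if symbol ≠ target_type then true else needs_move)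
    else
      pvScanB rest target_type (depth + 1) first_nonempty needs_move

def get_top_amphipod_to_move_alt (rooms : List (List String)) (room_index : Int) : Int :=
  (((PySem.List.pyGet? ROOM_TYPES room_index).bind fun target_type =>
    (PySem.List.pyGet? rooms room_index).map fun room_column =>
      pvScanB room_column target_type 0 (-1) false).getD 0)
  -- getD 0 is unreachable under Pre_ (IndexError in Python)

-- ===== PRECONDITION & SPEC =====
-- Pre_ excludes exactly the inputs on which Python A raises IndexError: room_index must be a
-- valid (possibly negative) Python index into both ROOM_TYPES (length 4) and rooms.
def Pre_get_top_amphipod_to_move (rooms : List (List String)) (room_index : Int) : Prop :=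
  PySem.Raise.InRange 4 room_index ∧ PySem.Raise.InRange rooms.length room_index
instance (rooms : List (List String)) (room_index : Int) : Decidable (Pre_get_top_amphipod_to_move rooms room_index) := by unfold Pre_get_top_amphipod_to_move; infer_instance

def pvWitness_get_top_amphipod_to_move : List (List String) × Int := ([[".", "B", "A"]], 0)

def Spec_get_top_amphipod_to_move (rooms : List (List String)) (room_index : Int) (out : Int) : Prop := out = get_top_amphipod_to_move_alt rooms room_index
instance (rooms : List (List String)) (room_index : Int) (out : Int) : Decidable (Spec_get_top_amphipod_to_move rooms room_index out) := by unfold Spec_get_top_amphipod_to_move; infer_instance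

-- ===== CLAIM (what is proved, stated in full; the proofs are below) =====
def Claim_equal_get_top_amphipod_to_move : Prop := ∀ (rooms : List (List String)) (room_index : Int), Dom_get_top_amphipod_to_move rooms room_index → Pre_get_top_amphipod_to_move rooms room_index → Spec_get_top_amphipod_to_move rooms room_index (get_top_amphipod_to_move rooms room_index)

-- ===== LEMMAS AND PROOFS =====

-- once needs_move is true, the first-nonempty accumulator (already ≠ -1) is the result
theorem pvScanB_true (col : List String) (t : String) (d fn : Int) (h : fn ≠ -1) :
    pvScanB col t d fn true = fn := by
  induction col generalizing d fn with
  | nil => simp [pvScanB]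
  | cons s rest ih =>
    by_cases hs : s = "."
    · simpa [pvScanB, hs] using ih _ _ h
    · simpa [pvScanB, hs, h, ite_self] using ih _ _ h

theorem pvScanB_false (col : List String) (t : String) (d fn : Int) (hd : 0 ≤ d) :
    pvScanB col t d fn false =
      if col.all (fun s => s = "." ∨ s = t) then -1
      else if fn = -1 then pvFindDepthA col d else fn := by
  induction col generalizing d fn with
  | nil => simp [pvScanB]
  | cons s rest ih =>
    by_cases hs : s = "."
    · simp [pvScanB, pvFindDepthA, hs, ih (d + 1) fn (by omega)]
    · by_cases ht : s = t
      · subst ht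
        have hstep : pvScanB (s :: rest) s d fn false
            = pvScanB rest s (d + 1) (if fn = -1 then d else fn) false := by
          simp [pvScanB, hs]
        rw [hstep, ih (d + 1) _ (by omega)]
        have hcons : ((s :: rest).all fun x => decide (x = "." ∨ x = s))
            = (rest.all fun x => decide (x = "." ∨ x = s)) := by simp
        rw [hcons]
        by_cases hall : (rest.all fun x => decide (x = "." ∨ x = s)) = true
        · rw [if_pos hall, if_pos hall]
        · rw [if_neg hall, if_neg hall]
          by_cases hfn : fn = -1
          · have hd' : ¬ d = -1 := by omega
            rw [if_pos hfn, if_pos hfn, if_neg hd']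
            simp [pvFindDepthA, hs]
          · rw [if_neg hfn, if_neg hfn, if_neg hfn]
      · have hfn' : (if fn = -1 then d else fn) ≠ -1 := by split <;> omega
        have hstep : pvScanB (s :: rest) t d fn false
            = pvScanB rest t (d + 1) (if fn = -1 then d else fn) true := by
          simp [pvScanB, hs, ht]
        rw [hstep, pvScanB_true rest t (d + 1) _ hfn']
        have hallf : ((s :: rest).all fun x => decide (x = "." ∨ x = t)) = false := by
          simp [hs, ht]
        rw [hallf]
        simp [pvFindDepthA, hs]

-- ===== VERDICT (by name: the statement is the Claim_ definition above) =====
theorem get_top_amphipod_to_move_spec : Claim_equal_get_top_amphipod_to_move := by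
  intro rooms room_index _ hpre
  obtain ⟨h1, h2⟩ := hpre
  unfold Spec_get_top_amphipod_to_move get_top_amphipod_to_move get_top_amphipod_to_move_alt
  cases ht : PySem.List.pyGet? ROOM_TYPES room_index with
  | none => exact absurd h1 ((PySem.List.pyGet?_eq_none_iff _ _).mp ht)
  | some t =>
    cases hcol : PySem.List.pyGet? rooms room_index with
    | none => exact absurd h2 ((PySem.List.pyGet?_eq_none_iff _ _).mp hcol)
    | some col =>
      simp only [Option.bind_some, Option.map_some, Option.getD_some]
      show (if (col.all fun symbol => decide (symbol = "." ∨ symbol = t)) = true then (-1 : Int)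
            else pvFindDepthA col 0) = pvScanB col t 0 (-1) false
      rw [pvScanB_false col t 0 (-1) (by omega)]
      simp
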